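-- pv_equiv track=rewrite | github.com/imndaiga/historia | backend/app/forge.py | count_family_member_instances
-- ===== SOURCE A (Python) =====
-- def count_family_member_instances(family_dict, list_of_families):
--     duplication_count = 0
--     for fd in list_of_families:
--         for relation1 in fd:
--             for relation2 in family_dict:
--                 for member1 in fd[relation1]:
--                     for member2 in family_dict[relation2]:
--                         if member2 == member1:
--                             duplication_count += 1
--
--     return duplication_count
-- ===== SOURCE B (Python) =====
-- def count_family_member_instances(family_dict, list_of_families):
--     member_counts = {}
--     for relation in family_dict:
--         for member in family_dict[relation]:
--             member_counts[member] = member_counts.get(member, 0) + 1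
--     total = 0
--     for fd in list_of_families:
--         for relation in fd:
--             for member in fd[relation]:
--                 total += member_counts.get(member, 0)
--     return total
-- ===== Notes on version B (the rewrite author's own statement) =====
-- stated objective: faster
-- what changed: Replaces the quadruple nested scan (every relation pair of fd x family_dict, every member pair) by a single counting dict over family_dict's members, then one pass over the families adding each member's precomputed count.
import Mathlib
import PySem

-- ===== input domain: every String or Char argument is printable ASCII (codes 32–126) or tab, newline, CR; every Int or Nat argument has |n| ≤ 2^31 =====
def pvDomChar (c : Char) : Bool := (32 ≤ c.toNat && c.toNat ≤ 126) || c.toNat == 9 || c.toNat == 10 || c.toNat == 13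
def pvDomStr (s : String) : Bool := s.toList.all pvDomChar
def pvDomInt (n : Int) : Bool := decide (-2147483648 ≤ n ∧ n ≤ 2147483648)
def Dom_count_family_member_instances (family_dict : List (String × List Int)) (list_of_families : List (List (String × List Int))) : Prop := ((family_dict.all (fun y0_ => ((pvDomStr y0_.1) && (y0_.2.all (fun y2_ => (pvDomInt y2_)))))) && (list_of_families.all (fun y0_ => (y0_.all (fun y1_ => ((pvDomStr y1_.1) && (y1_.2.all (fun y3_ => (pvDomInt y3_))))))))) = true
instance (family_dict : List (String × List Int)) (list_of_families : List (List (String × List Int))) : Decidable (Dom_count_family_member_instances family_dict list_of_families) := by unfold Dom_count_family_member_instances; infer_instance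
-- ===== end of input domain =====

-- B replaces A's quadruple nested scan by a precomputed member-count dict and a single pass (faster).

-- ===== PORT A =====
-- dicts are association lists; 'for k in d' iterates keys, 'd[k]' is first-match lookup
def count_family_member_instances (family_dict : List (String × List Int)) (list_of_families : List (List (String × List Int))) : Int :=
  list_of_families.foldl (fun acc fd =>
    fd.foldl (fun acc r1 =>
      family_dict.foldl (fun acc r2 =>
        ((List.lookup r1.1 fd).getD []).foldl (fun acc m1 =>
          ((List.lookup r2.1 family_dict).getD []).foldl (fun acc m2 =>
            if m2 == m1 then acc + 1 else acc) acc) acc) acc) acc) 0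

-- ===== PORT B =====
def count_family_member_instances_alt (family_dict : List (String × List Int)) (list_of_families : List (List (String × List Int))) : Int :=
  let member_counts : PySem.Dict Int Int :=
    family_dict.foldl (fun d r =>
      ((List.lookup r.1 family_dict).getD []).foldl
        (fun d m => d.insert m (d.getD m 0 + 1)) d) PySem.Dict.empty
  list_of_families.foldl (fun total fd =>
    fd.foldl (fun total r =>
      ((List.lookup r.1 fd).getD []).foldl
        (fun total m => total + member_counts.getD m 0) total) total) 0

-- ===== PRECONDITION & SPEC =====
def Spec_count_family_member_instances (family_dict : List (String × List Int)) (list_of_families : List (List (String × List Int))) (out : Int) : Prop := out = count_family_member_instances_alt family_dict list_of_families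
instance (family_dict : List (String × List Int)) (list_of_families : List (List (String × List Int))) (out : Int) : Decidable (Spec_count_family_member_instances family_dict list_of_families out) := by unfold Spec_count_family_member_instances; infer_instance

-- ===== CLAIM (what is proved, stated in full; the proofs are below) =====
def Claim_equal_count_family_member_instances : Prop := ∀ (family_dict : List (String × List Int)) (list_of_families : List (List (String × List Int))), Dom_count_family_member_instances family_dict list_of_families → Spec_count_family_member_instances family_dict list_of_families (count_family_member_instances family_dict list_of_families)

-- ===== LEMMAS AND PROOFS =====

-- total count of v among all members of fam, relation by relation
def pvFamCount (fam : List (String × List Int)) (v : Int) : Int :=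
  (fam.map (fun r => (((List.lookup r.1 fam).getD []).count v : Int))).sum

-- the counter dict built by B tallies exactly pvFamCount
theorem pv_counts_getD (fam l : List (String × List Int)) (d : PySem.Dict Int Int) (v : Int) :
    (l.foldl (fun d r =>
      ((List.lookup r.1 fam).getD []).foldl (fun d m => d.insert m (d.getD m 0 + 1)) d) d).getD v 0
    = d.getD v 0 + (l.map (fun r => (((List.lookup r.1 fam).getD []).count v : Int))).sum := by
  induction l generalizing d with
  | nil => simp
  | cons r t ih =>
    simp only [List.foldl_cons, List.map_cons, List.sum_cons, ih,
      PySem.Dict.getD_foldl_insert_add_one]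
    ring

theorem pv_sum_comm (l1 : List α) (l2 : List β) (f : α → β → Int) :
    (l1.map (fun a => (l2.map (f a)).sum)).sum
    = (l2.map (fun b => (l1.map (fun a => f a b)).sum)).sum := by
  induction l1 with
  | nil => simp
  | cons a t ih => simp [ih, List.sum_map_add]

theorem count_family_member_instances_spec : Claim_equal_count_family_member_instances := by
  intro fam lof _
  unfold Spec_count_family_member_instances
  unfold count_family_member_instances count_family_member_instances_alt
  refine (PySem.List.foldl_congr_mem _ _ _ _ ?_).symm
  intro acc fd _
  refine PySem.List.foldl_congr_mem _ _ _ _ ?_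
  intro acc r _
  -- B's inner member loop: add precomputed counts
  rw [PySem.List.foldl_add (g := fun m =>
    (fam.foldl (fun d r =>
      ((List.lookup r.1 fam).getD []).foldl (fun d m => d.insert m (d.getD m 0 + 1)) d)
      PySem.Dict.empty).getD m 0)]
  -- A's loops over family_dict
  simp only [PySem.List.foldl_beq_add_one, PySem.List.foldl_add,
    pv_counts_getD, PySem.Dict.getD_empty, zero_add]
  rw [pv_sum_comm]
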